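-- pv_equiv track=rewrite | github.com/hvtuananh/adventofcode2018 | day05.py | colapse
-- ===== SOURCE A (Python) =====
-- def colapse(text, ignore=None):
--     stack = []
--
--     for c in text:
--         if ignore and c.lower() == ignore:
--             continue
--         if not stack:
--             stack.append(c)
--         elif c != stack[-1] and c.lower() == stack[-1].lower():
--             stack.pop()
--         else:
--             stack.append(c)
--
--     return stack
-- ===== SOURCE B (Python) =====
-- def colapse(text, ignore=None):
--     s = [c for c in text if not (ignore and c.lower() == ignore)]
--     changed = True
--     while changed:
--         changed = False
--         out = []
--         i = 0
--         while i < len(s):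
--             if i + 1 < len(s) and s[i] != s[i + 1] and s[i].lower() == s[i + 1].lower():
--                 i += 2
--                 changed = True
--             else:
--                 out.append(s[i])
--                 i += 1
--         s = out
--     return s
-- ===== Notes on version B (the rewrite author's own statement) =====
-- stated objective: alternative
-- what changed: A does one left-to-right pass with an explicit stack (push/pop at the top); B first filters the ignored unit out, then repeatedly scans the whole sequence removing every adjacent opposite-case pair it meets, looping until a full scan removes nothing.
import Mathlib
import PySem

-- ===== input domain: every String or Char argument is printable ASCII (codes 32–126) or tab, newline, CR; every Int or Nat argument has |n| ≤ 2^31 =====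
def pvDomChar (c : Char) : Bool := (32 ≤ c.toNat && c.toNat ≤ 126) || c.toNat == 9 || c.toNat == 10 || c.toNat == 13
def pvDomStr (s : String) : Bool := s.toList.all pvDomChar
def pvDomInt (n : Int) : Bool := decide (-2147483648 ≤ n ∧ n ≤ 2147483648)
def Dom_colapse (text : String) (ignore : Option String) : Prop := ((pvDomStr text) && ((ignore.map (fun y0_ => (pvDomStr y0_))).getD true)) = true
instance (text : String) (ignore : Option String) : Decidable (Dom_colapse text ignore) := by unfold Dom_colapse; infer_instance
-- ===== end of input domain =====

-- ===== PORT A =====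
-- B replaces A's single left-to-right stack pass by repeated full scans that drop adjacent
-- opposite-case pairs until a fixed point (alternative decomposition; not claimed faster).

-- the `ignore and c.lower() == ignore` test (None and "" are falsy), shared verbatim by both Pythons
def ignCond (ignore : Option String) (c : Char) : Bool :=
  match ignore with
  | none => false
  | some ig => decide (ig ≠ "") && decide (PySem.Str.lower (String.ofList [c]) = ig)

-- the `if not stack / elif … / else` body of A's loop
def pushA (stack : List String) (cs : String) : List String :=
  match stack.getLast? with
  | none => stack ++ [cs]
  | some t =>
      if cs ≠ t ∧ PySem.Str.lower cs = PySem.Str.lower t then stack.dropLast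
      else stack ++ [cs]

def colapse (text : String) (ignore : Option String) : List String :=
  text.toList.foldl
    (fun stack c => if ignCond ignore c then stack else pushA stack (String.ofList [c])) []

-- ===== PORT B =====
-- one scan of B's inner `while i < len(s)` loop: (output list, whether anything was removed)
def onePassB : List String → List String × Bool
  | [] => ([], false)
  | [a] => ([a], false)
  | a :: b :: t =>
    if a ≠ b ∧ PySem.Str.lower a = PySem.Str.lower b then ((onePassB t).1, true)
    else
      let r := onePassB (b :: t)
      (a :: r.1, r.2)

-- termination measure for the fixed-point loop (cited by `decreasing_by` below)
theorem onePassB_length_le : ∀ s : List String, (onePassB s).1.length ≤ s.length := by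
  intro s
  induction s using onePassB.induct with
  | case1 => simp [onePassB]
  | case2 a => simp [onePassB]
  | case3 a b t h ih =>
      simp only [onePassB, if_pos h, List.length_cons]
      omega
  | case4 a b t h ih =>
      simp only [onePassB, if_neg h, List.length_cons]
      simp only [List.length_cons] at ih
      omega

theorem onePassB_length_lt (s : List String) (h : (onePassB s).2 = true) :
    (onePassB s).1.length < s.length := by
  induction s using onePassB.induct with
  | case1 => simp [onePassB] at h
  | case2 a => simp [onePassB] at h
  | case3 a b t hc ih =>
      simp only [onePassB, if_pos hc, List.length_cons]
      have := onePassB_length_le t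
      omega
  | case4 a b t hc ih =>
      simp only [onePassB, if_neg hc, List.length_cons] at h ⊢
      have := ih h
      simp only [List.length_cons] at this
      omega

-- B's outer `while changed` loop
def fixLoopB (s : List String) : List String :=
  let r := onePassB s
  if h : r.2 = true then fixLoopB r.1 else r.1
termination_by s.length
decreasing_by exact onePassB_length_lt s h

def colapse_alt (text : String) (ignore : Option String) : List String :=
  fixLoopB ((text.toList.filter (fun c => ! ignCond ignore c)).map (fun c => String.ofList [c]))

-- ===== PRECONDITION & SPEC =====
def Spec_colapse (text : String) (ignore : Option String) (out : List String) : Prop := out = colapse_alt text ignore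
instance (text : String) (ignore : Option String) (out : List String) : Decidable (Spec_colapse text ignore out) := by unfold Spec_colapse; infer_instance

-- ===== CLAIM (what is proved, stated in full; the proofs are below) =====
def Claim_equal_colapse : Prop := ∀ (text : String) (ignore : Option String), Dom_colapse text ignore → Spec_colapse text ignore (colapse text ignore)

-- ===== LEMMAS AND PROOFS =====

-- `React x y`: x and y are the reacting-pair test both programs apply to adjacent units
def React (x y : String) : Prop := x ≠ y ∧ PySem.Str.lower x = PySem.Str.lower y

def Sing (x : String) : Prop := ∃ c : Char, x = String.ofList [c]

def Irred (s : List String) : Prop := List.IsChain (fun x y => ¬ React x y) s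

theorem React_symm {x y : String} (h : React x y) : React y x := ⟨h.1.symm, h.2.symm⟩

theorem toNat_lowerChar (c : Char) :
    (PySem.Chars.lowerChar c).toNat =
      if 65 ≤ c.toNat ∧ c.toNat ≤ 90 then c.toNat + 32 else c.toNat := by
  have hA : ('A' ≤ c) = (65 ≤ c.toNat) := by
    rw [Char.le_def, UInt32.le_iff_toNat_le]; rfl
  have hZ : (c ≤ 'Z') = (c.toNat ≤ 90) := by
    rw [Char.le_def, UInt32.le_iff_toNat_le]; rfl
  have hcond : ((decide ('A' ≤ c) && decide (c ≤ 'Z')) = true) ↔ (65 ≤ c.toNat ∧ c.toNat ≤ 90) := by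
    simp [hA, hZ]
  unfold PySem.Chars.lowerChar PySem.Chars.isupper
  by_cases h : 65 ≤ c.toNat ∧ c.toNat ≤ 90
  · have hv : Nat.isValidChar (c.toNat + 32) := Or.inl (by omega)
    rw [if_pos (hcond.mpr h), if_pos h]
    show (Char.ofNat (c.toNat + 32)).toNat = c.toNat + 32
    unfold Char.ofNat
    rw [dif_pos hv]
    exact Char.toNat_ofNatAux hv
  · rw [if_neg (fun hc => h (hcond.mp hc)), if_neg h]

theorem toNat_inj {a b : Char} (h : a.toNat = b.toNat) : a = b := by
  apply Char.ext; exact UInt32.toNat_inj.mp h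

-- a character has at most one reaction partner
theorem lowerChar_uniq {x a y : Char} (hx : x ≠ a) (hy : y ≠ a)
    (hlx : PySem.Chars.lowerChar x = PySem.Chars.lowerChar a)
    (hly : PySem.Chars.lowerChar y = PySem.Chars.lowerChar a) : x = y := by
  have hx' : x.toNat ≠ a.toNat := fun h => hx (toNat_inj h)
  have hy' : y.toNat ≠ a.toNat := fun h => hy (toNat_inj h)
  have e1 := congrArg Char.toNat hlx
  have e2 := congrArg Char.toNat hly
  rw [toNat_lowerChar, toNat_lowerChar] at e1 e2
  apply toNat_inj
  split_ifs at e1 e2 <;> omega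

theorem React_lower_list {x a : String} (h : React x a) :
    List.map PySem.Chars.lowerChar x.toList = List.map PySem.Chars.lowerChar a.toList := by
  have := congrArg String.toList h.2
  simpa [PySem.Chars.lower] using this

theorem React_uniq {x a y : String} (ha : Sing a)
    (hx : React x a) (hy : React y a) : x = y := by
  obtain ⟨ca, rfl⟩ := ha
  have hx2 := React_lower_list hx
  have hy2 := React_lower_list hy
  simp only [String.toList_ofList, List.map_cons, List.map_nil] at hx2 hy2
  obtain ⟨cx, hxl, hcx⟩ := List.map_eq_singleton_iff.mp hx2
  obtain ⟨cy, hyl, hcy⟩ := List.map_eq_singleton_iff.mp hy2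
  have hxa : cx ≠ ca := by
    intro h; apply hx.1
    apply String.toList_inj.mp; simp [hxl, h]
  have hya : cy ≠ ca := by
    intro h; apply hy.1
    apply String.toList_inj.mp; simp [hyl, h]
  have : cx = cy := lowerChar_uniq hxa hya hcx hcy
  apply String.toList_inj.mp; simp [hxl, hyl, this]

theorem pushA_of_react {p : List String} {t x : String} (h : p.getLast? = some t)
    (hr : React x t) : pushA p x = p.dropLast := by
  simp only [pushA, h]
  exact if_pos hr

theorem pushA_of_not_react {p : List String} {x : String}
    (hr : ∀ t ∈ p.getLast?, ¬ React x t) : pushA p x = p ++ [x] := by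
  unfold pushA
  cases h : p.getLast? with
  | none => rfl
  | some t => exact if_neg (hr t (by simp [h]))

theorem Irred_pushA {p : List String} (hp : Irred p) (x : String) : Irred (pushA p x) := by
  unfold pushA
  cases h : p.getLast? with
  | none =>
      have : p = [] := List.getLast?_eq_none_iff.mp h
      subst this; simp [Irred]
  | some t =>
      simp only []
      split_ifs with hc
      · exact hp.dropLast
      · unfold Irred
        rw [List.isChain_append]
        refine ⟨hp, by simp, ?_⟩
        intro a ha y hy
        simp at hy; subst hy
        rw [h] at ha; simp at ha; subst ha
        intro hR; exact hc (React_symm hR)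

theorem Irred_not_react_last {q : List String} {y t : String}
    (hp : Irred (q ++ [y, t])) : ¬ React y t := by
  have := List.isChain_append.mp hp
  exact (this.2.1).rel_head

-- pushing a reacting pair onto an irreducible stack is a no-op
theorem pushA_pair {p : List String} {a b : String} (hp : Irred p) (ha : Sing a)
    (hr : React a b) : pushA (pushA p a) b = p := by
  cases hgl : p.getLast? with
  | none =>
      have hpe : p = [] := List.getLast?_eq_none_iff.mp hgl
      subst hpe
      have h1 : pushA [] a = [a] := pushA_of_not_react (by simp)
      rw [h1, pushA_of_react (show ([a] : List String).getLast? = some a by simp) (React_symm hr)]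
      simp
  | some t =>
      have hsplit : p.dropLast ++ [t] = p := List.dropLast_append_getLast? t hgl
      by_cases hat : React a t
      · -- a reacts with the top: pop, then b restores the popped unit (b = t)
        have hbt : b = t := React_uniq ha (React_symm hr) (React_symm hat)
        rw [pushA_of_react hgl hat]
        rw [pushA_of_not_react ?_, hbt, hsplit]
        intro y hy hby
        have hy' : p.dropLast.getLast? = some y := hy
        have h2 : p.dropLast.dropLast ++ [y, t] = p := by
          have := List.dropLast_append_getLast? y hy'
          rw [← hsplit, ← this]; simp
        have : ¬ React y t := Irred_not_react_last (by rw [h2]; exact hp)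
        exact this (React_symm (hbt ▸ hby))
      · have h1 : pushA p a = p ++ [a] :=
          pushA_of_not_react (by intro u hu; rw [hgl] at hu; simp at hu; subst hu; exact hat)
        rw [h1, pushA_of_react (show (p ++ [a]).getLast? = some a by simp) (React_symm hr)]
        simp

-- one B-pass does not change what A's stack run makes of the sequence
theorem onePassB_foldl (s : List String) : ∀ p : List String, Irred p → (∀ x ∈ s, Sing x) →
    List.foldl pushA p (onePassB s).1 = List.foldl pushA p s := by
  induction s using onePassB.induct with
  | case1 => intro p _ _; rfl
  | case2 a => intro p _ _; rfl
  | case3 a b t hc ih =>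
      intro p hp hs
      simp only [onePassB, if_pos hc, List.foldl_cons]
      rw [ih p hp (fun x hx => hs x (by simp [hx]))]
      have ha : Sing a := hs a (by simp)
      rw [show pushA (pushA p a) b = p from pushA_pair hp ha hc]
  | case4 a b t hc ih =>
      intro p hp hs
      simp only [onePassB, if_neg hc, List.foldl_cons]
      exact ih (pushA p a) (Irred_pushA hp a) (fun x hx => hs x (by simp [hx]))

theorem onePassB_of_not_changed (s : List String) (h : (onePassB s).2 = false) :
    (onePassB s).1 = s ∧ Irred s := by
  induction s using onePassB.induct with
  | case1 => exact ⟨rfl, by simp [Irred]⟩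
  | case2 a => exact ⟨rfl, by simp [Irred]⟩
  | case3 a b t hc ih => simp [onePassB, if_pos hc] at h
  | case4 a b t hc ih =>
      simp only [onePassB, if_neg hc] at h ⊢
      obtain ⟨h1, h2⟩ := ih h
      refine ⟨by rw [h1], ?_⟩
      unfold Irred
      rw [List.isChain_cons]
      exact ⟨fun y hy => by simp at hy; subst hy; exact hc, h2⟩

theorem onePassB_mem {s : List String} {x : String} (h : x ∈ (onePassB s).1) : x ∈ s := by
  induction s using onePassB.induct with
  | case1 => simpa [onePassB] using h
  | case2 a => simpa [onePassB] using h
  | case3 a b t hc ih =>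
      simp only [onePassB, if_pos hc] at h
      simp [ih h]
  | case4 a b t hc ih =>
      simp only [onePassB, if_neg hc, List.mem_cons] at h
      rcases h with h | h
      · simp [h]
      · simp only [List.mem_cons] at ih ⊢
        tauto

-- A's stack run leaves an irreducible sequence unchanged
theorem foldl_pushA_irred (o : List String) : ∀ p : List String, Irred (p ++ o) →
    List.foldl pushA p o = p ++ o := by
  induction o with
  | nil => intro p _; simp
  | cons x o' ih =>
      intro p hpo
      have h1 : pushA p x = p ++ [x] := by
        apply pushA_of_not_react
        intro t ht hR
        have hsplit : p.dropLast ++ [t] = p := List.dropLast_append_getLast? t ht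
        have h2 : p.dropLast ++ [t, x] ++ o' = p ++ x :: o' := by rw [← hsplit]; simp
        have hch : Irred (p.dropLast ++ [t, x] ++ o') := by rw [h2]; exact hpo
        have := List.isChain_append.mp ((List.append_assoc _ _ _) ▸ hch)
        have hnt : ¬ React t x := by
          have h3 := this.2.1
          simp only [List.cons_append, List.nil_append] at h3
          exact h3.rel_head
        exact hnt (React_symm hR)
      rw [List.foldl_cons, h1]
      have := ih (p ++ [x]) (by simpa using hpo)
      rw [this]; simp

-- B's fixed-point loop computes exactly A's stack run
theorem fixLoopB_eq_foldl (s : List String) (hs : ∀ x ∈ s, Sing x) :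
    fixLoopB s = List.foldl pushA [] s := by
  induction s using fixLoopB.induct with
  | case1 s r h ih =>
      rw [fixLoopB]
      show (if h : (onePassB s).2 = true then fixLoopB (onePassB s).1 else (onePassB s).1) = _
      rw [dif_pos h]
      have hs' : ∀ x ∈ (onePassB s).1, Sing x := fun x hx => hs x (onePassB_mem hx)
      rw [ih hs']
      exact onePassB_foldl s [] (by simp [Irred]) hs
  | case2 s r h =>
      rw [fixLoopB]
      show (if h : (onePassB s).2 = true then fixLoopB (onePassB s).1 else (onePassB s).1) = _
      rw [dif_neg h]
      obtain ⟨h1, h2⟩ := onePassB_of_not_changed s (by simpa using h)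
      rw [h1]
      have := foldl_pushA_irred s [] (by simpa using h2)
      rw [this]; simp

theorem colapse_eq_foldl (ignore : Option String) (l : List Char) : ∀ s : List String,
    List.foldl (fun stack c => if ignCond ignore c then stack else pushA stack (String.ofList [c])) s l
      = List.foldl pushA s ((l.filter (fun c => ! ignCond ignore c)).map (fun c => String.ofList [c])) := by
  induction l with
  | nil => intro s; rfl
  | cons c l' ih =>
      intro s
      by_cases h : ignCond ignore c = true
      · simp [h, ih]
      · simp only [Bool.not_eq_true] at h
        simp [h, ih]

-- ===== VERDICT (by name: the statement is the Claim_ definition above) =====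
theorem colapse_spec : Claim_equal_colapse := by
  intro text ignore _
  unfold Spec_colapse colapse colapse_alt
  rw [colapse_eq_foldl, fixLoopB_eq_foldl]
  intro x hx
  simp only [List.mem_map] at hx
  obtain ⟨c, _, rfl⟩ := hx
  exact ⟨c, rfl⟩
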